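-- pv_equiv track=rewrite | github.com/565353780/auto-scan2cad | scene-layout-detect/scene_layout_detect/Method/dist.py | isSamePoint
-- ===== SOURCE A (Python) =====
-- def isSamePoint(point_list):
--     point_num = len(point_list)
--
--     if point_num < 2:
--         return True
--
--     first_point = point_list[0]
--
--     for i in range(1, point_num):
--         point = point_list[i]
--         if point[0] != first_point[0] or point[1] != first_point[1]:
--             return False
--     return True
-- ===== SOURCE B (Python) =====
-- def isSamePoint(point_list):
--     s = {(p[0], p[1]) for p in point_list}
--     return len(s) <= 1
-- ===== Notes on version B (the rewrite author's own statement) =====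
-- stated objective: simpler
-- what changed: Replaces the indexed scan comparing every point to the first with a one-pass set comprehension of coordinate pairs followed by a cardinality test (len <= 1).
import Mathlib
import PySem

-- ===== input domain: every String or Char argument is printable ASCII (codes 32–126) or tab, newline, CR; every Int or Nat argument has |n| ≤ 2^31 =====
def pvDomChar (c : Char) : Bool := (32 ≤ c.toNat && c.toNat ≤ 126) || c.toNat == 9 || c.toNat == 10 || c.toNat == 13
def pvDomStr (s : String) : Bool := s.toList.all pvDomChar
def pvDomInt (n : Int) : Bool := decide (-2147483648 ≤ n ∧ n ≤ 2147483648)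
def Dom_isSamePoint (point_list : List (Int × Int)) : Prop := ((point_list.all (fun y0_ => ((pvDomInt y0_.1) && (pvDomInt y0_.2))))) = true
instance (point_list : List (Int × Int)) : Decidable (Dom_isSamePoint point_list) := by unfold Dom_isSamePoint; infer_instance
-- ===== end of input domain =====

-- B replaces A's indexed compare-to-first scan with a one-pass set of coordinate pairs and a cardinality test (objective: simpler).

-- ===== PORT A =====
-- the for-loop with its early 'return False' is the List.all over range(1, point_num)
def isSamePoint (point_list : List (Int × Int)) : Bool :=
  let point_num : Int := point_list.length
  if point_num < 2 then true
  else
    match PySem.List.pyGet? point_list 0 with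
    | none => true  -- unreachable: point_num ≥ 2
    | some first_point =>
      (PySem.List.pyRange 1 point_num 1).all (fun i =>
        match PySem.List.pyGet? point_list i with
        | none => true  -- unreachable: i in range(1, point_num)
        | some point => !(point.1 != first_point.1 || point.2 != first_point.2))

-- ===== PORT B =====
def isSamePoint_alt (point_list : List (Int × Int)) : Bool :=
  let s : PySem.Set (Int × Int) := PySem.Set.ofList (point_list.map (fun p => (p.1, p.2)))
  decide (PySem.Set.len s ≤ 1)

-- ===== PRECONDITION & SPEC =====
def Spec_isSamePoint (point_list : List (Int × Int)) (out : Bool) : Prop := out = isSamePoint_alt point_list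
instance (point_list : List (Int × Int)) (out : Bool) : Decidable (Spec_isSamePoint point_list out) := by unfold Spec_isSamePoint; infer_instance

-- ===== CLAIM (what is proved, stated in full; the proofs are below) =====
def Claim_equal_isSamePoint : Prop := ∀ (point_list : List (Int × Int)), Dom_isSamePoint point_list → Spec_isSamePoint point_list (isSamePoint point_list)

-- ===== LEMMAS AND PROOFS =====

theorem allIdx_eq_drop (xs : List (Int × Int)) (g : Int × Int → Bool) :
    ∀ k : Nat,
      ((PySem.List.pyRange (k : Int) (xs.length : Int) 1).all (fun i =>
        match PySem.List.pyGet? xs i with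
        | none => true
        | some point => g point))
      = (xs.drop k).all g := by
  intro k
  generalize hn : xs.length - k = n
  induction n generalizing k with
  | zero =>
    have hk : xs.length ≤ k := by omega
    rw [PySem.List.pyRange_one_eq_nil (by exact_mod_cast hk)]
    simp [List.drop_eq_nil_of_le hk]
  | succ n ih =>
    have hk : k < xs.length := by omega
    rw [PySem.List.pyRange_one_cons (by exact_mod_cast hk)]
    rw [List.all_cons]
    have hget : PySem.List.pyGet? xs (k : Int) = some xs[k] := by
      simp [PySem.List.pyGet?_natCast, List.getElem?_eq_getElem hk]
    rw [hget]
    have : ((k : Int) + 1) = ((k + 1 : Nat) : Int) := by push_cast; ring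
    rw [this, ih (k+1) (by omega)]
    conv_rhs => rw [← List.getElem_cons_drop hk]
    rw [List.all_cons]

theorem ofList_all_eq (a : Int × Int) (xs : List (Int × Int)) (h : ∀ x ∈ xs, x = a) :
    PySem.Set.ofList (a :: xs) = [a] := by
  have h1 : PySem.Set.ofList (a :: xs) = xs.foldl PySem.Set.add [a] := by
    rw [PySem.Set.ofList_eq_foldl]; simp [PySem.Set.add]
  rw [h1]
  clear h1
  induction xs with
  | nil => rfl
  | cons x t ih =>
    have hx : x = a := h x (by simp)
    subst hx
    simp only [List.foldl_cons]
    have : PySem.Set.add [x] x = [x] := by simp [PySem.Set.add, PySem.Set.contains]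
    rw [this]
    exact ih (fun y hy => h y (by simp [hy]))

theorem ofList_two_le (a x : Int × Int) (xs : List (Int × Int)) (hx : x ∈ xs) (hne : x ≠ a) :
    2 ≤ (PySem.Set.ofList (a :: xs)).length := by
  have ha : a ∈ PySem.Set.ofList (a :: xs) := by rw [PySem.Set.mem_ofList]; simp
  have hxm : x ∈ PySem.Set.ofList (a :: xs) := by rw [PySem.Set.mem_ofList]; simp [hx]
  match h : PySem.Set.ofList (a :: xs) with
  | [] => rw [h] at ha; simp at ha
  | [y] =>
    rw [h] at ha hxm; simp at ha hxm
    exact absurd (hxm.trans ha.symm) hne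
  | y :: z :: t => simp

theorem isSamePoint_eq_alt : ∀ pl : List (Int × Int), isSamePoint pl = isSamePoint_alt pl := by
  intro pl
  match pl with
  | [] => rfl
  | [p] => simp [isSamePoint, isSamePoint_alt, PySem.Set.len, PySem.Set.ofList, PySem.Set.add]
  | fp :: q :: rest =>
    have hlen : ¬ ((((fp :: q :: rest : List (Int × Int)).length : Int)) < 2) := by
      simp
    have hmap : (fp :: q :: rest).map (fun p : Int × Int => (p.1, p.2)) = fp :: q :: rest := by
      simp
    unfold isSamePoint isSamePoint_alt
    simp only [hmap, if_neg hlen]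
    have h0 : PySem.List.pyGet? (fp :: q :: rest) 0 = some fp := by
      simp [PySem.List.pyGet?, PySem.List.pyIdx?,
        show (0:Int) ≤ (rest.length:Int) + 1 by positivity]
    rw [h0]
    have hr := allIdx_eq_drop (fp :: q :: rest)
      (fun point => !(point.1 != fp.1 || point.2 != fp.2)) 1
    simp only [Nat.cast_one] at hr
    refine hr.trans ?_
    by_cases h : ∀ x ∈ q :: rest, x = fp
    · rw [ofList_all_eq fp (q :: rest) h]
      have : (List.drop 1 (fp :: q :: rest)).all
          (fun point => !(point.1 != fp.1 || point.2 != fp.2)) = true := by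
        rw [List.all_eq_true]
        intro x hx
        rw [h x hx]
        simp
      rw [this]
      simp [PySem.Set.len]
    · push Not at h
      obtain ⟨x, hx, hne⟩ := h
      have h2 := ofList_two_le fp x (q :: rest) hx hne
      have hall : (List.drop 1 (fp :: q :: rest)).all
          (fun point => !(point.1 != fp.1 || point.2 != fp.2)) = false := by
        rw [List.all_eq_false]
        refine ⟨x, hx, ?_⟩
        simp only [Bool.not_eq_true]
        by_contra hc
        apply hne
        simp only [Bool.not_eq_false, Bool.not_or, Bool.and_eq_true] at hc
        simp at hc
        exact Prod.ext hc.1 hc.2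
      rw [hall]
      simp only [PySem.Set.len]
      symm
      rw [decide_eq_false_iff_not]
      omega

-- ===== VERDICT (by name: the statement is the Claim_ definition above) =====
theorem isSamePoint_spec : Claim_equal_isSamePoint := by
  intro pl _
  exact isSamePoint_eq_alt pl
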